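-- pv_equiv track=rewrite | github.com/skul9x/vaccineanalyzer | services/data_formatter.py | get_status_tags_for_missing_item
-- ===== SOURCE A (Python) =====
-- def get_status_tags_for_missing_item(status_tags_list):
--     if any(t in ["due", "flu_second_dose", "flu_annual", "multiple_options"] for t in status_tags_list):
--         return "due"
--     elif any(t in ["too_young", "error_age_first_dose", "too_early", "series_restart_needed", "too_old_to_start", "too_old_at_first_dose"] for t in status_tags_list):
--         return "warning"
--     elif any(t in ["info", "coverage_by_other", "flu_interval_note", "info_too_old_or_no_option"] for t in status_tags_list):
--         return "info"
--     elif any(t.startswith("error") for t in status_tags_list):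
--         return "error"
--     return "normal"
-- ===== SOURCE B (Python) =====
-- _CATS = ["due", "warning", "info", "error", "normal"]
--
-- def _priority(tag):
--     if tag in ("due", "flu_second_dose", "flu_annual", "multiple_options"):
--         return 0
--     if tag in ("too_young", "error_age_first_dose", "too_early", "series_restart_needed", "too_old_to_start", "too_old_at_first_dose"):
--         return 1
--     if tag in ("info", "coverage_by_other", "flu_interval_note", "info_too_old_or_no_option"):
--         return 2
--     if tag.startswith("error"):
--         return 3
--     return 4
--
-- def get_status_tags_for_missing_item(status_tags_list):
--     best = 4
--     for t in status_tags_list: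
--         p = _priority(t)
--         if p < best:
--             best = p
--     return _CATS[best]
-- ===== Notes on version B (the rewrite author's own statement) =====
-- stated objective: alternative
-- what changed: Replaced the four separate any() scans over the list (one per category) by a single pass that tracks the minimum per-tag priority (due=0, warning=1, info=2, error-prefix=3, normal=4) and maps the winning priority to its category name.
import Mathlib
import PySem

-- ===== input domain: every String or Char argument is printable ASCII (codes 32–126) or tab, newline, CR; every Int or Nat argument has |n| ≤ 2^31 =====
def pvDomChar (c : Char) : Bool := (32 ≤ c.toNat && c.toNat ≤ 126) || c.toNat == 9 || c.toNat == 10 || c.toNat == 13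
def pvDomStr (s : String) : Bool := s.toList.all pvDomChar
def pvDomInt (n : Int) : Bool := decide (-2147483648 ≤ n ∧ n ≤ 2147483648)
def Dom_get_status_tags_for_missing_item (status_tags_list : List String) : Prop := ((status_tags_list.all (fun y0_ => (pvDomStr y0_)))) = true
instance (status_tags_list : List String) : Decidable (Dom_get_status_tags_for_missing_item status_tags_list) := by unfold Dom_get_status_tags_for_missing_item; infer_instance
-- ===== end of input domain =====

-- B replaces A's four separate any() scans by one pass tracking the minimum per-tag
-- priority, then maps the winning priority to its category name (objective: alternative).

-- ===== PORT A =====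
def get_status_tags_for_missing_item (status_tags_list : List String) : String :=
  if status_tags_list.any (fun t => ["due", "flu_second_dose", "flu_annual", "multiple_options"].contains t) then
    "due"
  else if status_tags_list.any (fun t => ["too_young", "error_age_first_dose", "too_early", "series_restart_needed", "too_old_to_start", "too_old_at_first_dose"].contains t) then
    "warning"
  else if status_tags_list.any (fun t => ["info", "coverage_by_other", "flu_interval_note", "info_too_old_or_no_option"].contains t) then
    "info"
  else if status_tags_list.any (fun t => PySem.Str.startswith t "error") then
    "error"
  else
    "normal"

-- ===== PORT B =====
def pvCats : List String := ["due", "warning", "info", "error", "normal"]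

def pvPriority (tag : String) : Nat :=
  if ["due", "flu_second_dose", "flu_annual", "multiple_options"].contains tag then 0
  else if ["too_young", "error_age_first_dose", "too_early", "series_restart_needed", "too_old_to_start", "too_old_at_first_dose"].contains tag then 1
  else if ["info", "coverage_by_other", "flu_interval_note", "info_too_old_or_no_option"].contains tag then 2
  else if PySem.Str.startswith tag "error" then 3
  else 4

def get_status_tags_for_missing_item_alt (status_tags_list : List String) : String :=
  let best := status_tags_list.foldl
    (fun best t => let p := pvPriority t; if p < best then p else best) 4
  -- _CATS[best]: best is always in 0..4, so plain indexing never raises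
  pvCats.getD best ""

-- ===== PRECONDITION & SPEC =====
def Spec_get_status_tags_for_missing_item (status_tags_list : List String) (out : String) : Prop := out = get_status_tags_for_missing_item_alt status_tags_list
instance (status_tags_list : List String) (out : String) : Decidable (Spec_get_status_tags_for_missing_item status_tags_list out) := by unfold Spec_get_status_tags_for_missing_item; infer_instance

-- ===== CLAIM (what is proved, stated in full; the proofs are below) =====
def Claim_equal_get_status_tags_for_missing_item : Prop := ∀ (status_tags_list : List String), Dom_get_status_tags_for_missing_item status_tags_list → Spec_get_status_tags_for_missing_item status_tags_list (get_status_tags_for_missing_item status_tags_list)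

-- ===== LEMMAS AND PROOFS =====

-- minimum priority over a list, in structural (foldr) form
def pvRInf (xs : List String) : Nat := xs.foldr (fun t a => min (pvPriority t) a) 4

lemma pvPriority_le (t : String) : pvPriority t ≤ 4 := by
  unfold pvPriority; split_ifs <;> omega

lemma pvFoldl_eq (xs : List String) : ∀ m : Nat, m ≤ 4 →
    xs.foldl (fun best t => let p := pvPriority t; if p < best then p else best) m
      = min m (pvRInf xs) := by
  induction xs with
  | nil => intro m hm; simp [pvRInf]; omega
  | cons t xs ih =>
    intro m hm
    simp only [List.foldl_cons, pvRInf, List.foldr_cons] at *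
    rw [ih]
    · have := pvPriority_le t
      split_ifs <;> omega
    · have := pvPriority_le t
      split_ifs <;> omega

lemma pvRInf_le (xs : List String) (t : String) (h : t ∈ xs) : pvRInf xs ≤ pvPriority t := by
  induction xs with
  | nil => cases h
  | cons u xs ih =>
    simp only [pvRInf, List.foldr_cons] at *
    rcases List.mem_cons.mp h with h | h
    · subst h; omega
    · have := ih h; omega

lemma pvRInf_le4 (xs : List String) : pvRInf xs ≤ 4 := by
  induction xs with
  | nil => simp [pvRInf]
  | cons u xs ih => simp only [pvRInf, List.foldr_cons] at *; omega

lemma pvRInf_mem (xs : List String) :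
    pvRInf xs = 4 ∨ ∃ t ∈ xs, pvPriority t = pvRInf xs := by
  induction xs with
  | nil => left; rfl
  | cons u xs ih =>
    simp only [pvRInf, List.foldr_cons] at *
    rcases Nat.le_total (pvPriority u) (xs.foldr (fun t a => min (pvPriority t) a) 4) with h | h
    · right; exact ⟨u, List.mem_cons_self, by omega⟩
    · rcases ih with h4 | ⟨t, ht, he⟩
      · left; omega
      · right; exact ⟨t, List.mem_cons_of_mem _ ht, by omega⟩

lemma pvP0 (t : String)
    (h : ["due", "flu_second_dose", "flu_annual", "multiple_options"].contains t = true) :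
    pvPriority t = 0 := by
  simp only [List.contains_eq_mem, decide_eq_true_eq] at h
  fin_cases h <;> decide

lemma pvP0' (t : String) (h : pvPriority t = 0) :
    ["due", "flu_second_dose", "flu_annual", "multiple_options"].contains t = true := by
  unfold pvPriority at h; split_ifs at h <;> simp_all

lemma pvP1 (t : String)
    (h : ["too_young", "error_age_first_dose", "too_early", "series_restart_needed", "too_old_to_start", "too_old_at_first_dose"].contains t = true) :
    pvPriority t = 1 := by
  simp only [List.contains_eq_mem, decide_eq_true_eq] at h
  fin_cases h <;> decide

lemma pvP1' (t : String) (h : pvPriority t = 1) :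
    ["too_young", "error_age_first_dose", "too_early", "series_restart_needed", "too_old_to_start", "too_old_at_first_dose"].contains t = true := by
  unfold pvPriority at h; split_ifs at h <;> simp_all

lemma pvP2 (t : String)
    (h : ["info", "coverage_by_other", "flu_interval_note", "info_too_old_or_no_option"].contains t = true) :
    pvPriority t = 2 := by
  simp only [List.contains_eq_mem, decide_eq_true_eq] at h
  fin_cases h <;> decide

lemma pvP2' (t : String) (h : pvPriority t = 2) :
    ["info", "coverage_by_other", "flu_interval_note", "info_too_old_or_no_option"].contains t = true := by
  unfold pvPriority at h; split_ifs at h <;> simp_all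

lemma pvP3' (t : String) (h : pvPriority t = 3) : PySem.Str.startswith t "error" = true := by
  unfold pvPriority at h; split_ifs at h <;> simp_all

-- ===== VERDICT (by name: the statement is the Claim_ definition above) =====
theorem get_status_tags_for_missing_item_spec : Claim_equal_get_status_tags_for_missing_item := by
  intro xs _
  unfold Spec_get_status_tags_for_missing_item get_status_tags_for_missing_item
    get_status_tags_for_missing_item_alt
  rw [pvFoldl_eq xs 4 (by omega), Nat.min_eq_right (pvRInf_le4 xs)]
  have hmem := pvRInf_mem xs
  have hle4 := pvRInf_le4 xs
  split_ifs with h0 h1 h2 h3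
  · -- "due"
    obtain ⟨t, ht, hc⟩ := List.any_eq_true.mp h0
    have := pvRInf_le xs t ht
    have := pvP0 t hc
    have h : pvRInf xs = 0 := by omega
    rw [h]; rfl
  · -- "warning"
    obtain ⟨t, ht, hc⟩ := List.any_eq_true.mp h1
    have := pvRInf_le xs t ht
    have := pvP1 t hc
    have hne0 : pvRInf xs ≠ 0 := by
      intro he
      rcases hmem with h4 | ⟨u, hu, hpu⟩
      · omega
      · exact (List.any_eq_true.not.mp h0) ⟨u, hu, pvP0' u (by omega)⟩
    have h : pvRInf xs = 1 := by omega
    rw [h]; rfl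
  · -- "info"
    obtain ⟨t, ht, hc⟩ := List.any_eq_true.mp h2
    have := pvRInf_le xs t ht
    have := pvP2 t hc
    have h : pvRInf xs = 2 := by
      rcases hmem with h4 | ⟨u, hu, hpu⟩
      · omega
      · have hu0 : pvPriority u ≠ 0 := fun he =>
          (List.any_eq_true.not.mp h0) ⟨u, hu, pvP0' u he⟩
        have hu1 : pvPriority u ≠ 1 := fun he =>
          (List.any_eq_true.not.mp h1) ⟨u, hu, pvP1' u he⟩
        omega
    rw [h]; rfl
  · -- "error"
    obtain ⟨t, ht, hc⟩ := List.any_eq_true.mp h3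
    have hpt : pvPriority t = 3 := by
      unfold pvPriority
      have hd : ¬ (["due", "flu_second_dose", "flu_annual", "multiple_options"].contains t = true) :=
        fun he => (List.any_eq_true.not.mp h0) ⟨t, ht, he⟩
      have hw : ¬ (["too_young", "error_age_first_dose", "too_early", "series_restart_needed", "too_old_to_start", "too_old_at_first_dose"].contains t = true) :=
        fun he => (List.any_eq_true.not.mp h1) ⟨t, ht, he⟩
      have hi : ¬ (["info", "coverage_by_other", "flu_interval_note", "info_too_old_or_no_option"].contains t = true) :=
        fun he => (List.any_eq_true.not.mp h2) ⟨t, ht, he⟩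
      simp at hd hw hi hc
      simp [hd, hw, hi, hc]
    have := pvRInf_le xs t ht
    have h : pvRInf xs = 3 := by
      rcases hmem with h4 | ⟨u, hu, hpu⟩
      · omega
      · have hu0 : pvPriority u ≠ 0 := fun he =>
          (List.any_eq_true.not.mp h0) ⟨u, hu, pvP0' u he⟩
        have hu1 : pvPriority u ≠ 1 := fun he =>
          (List.any_eq_true.not.mp h1) ⟨u, hu, pvP1' u he⟩
        have hu2 : pvPriority u ≠ 2 := fun he =>
          (List.any_eq_true.not.mp h2) ⟨u, hu, pvP2' u he⟩
        omega
    rw [h]; rfl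
  · -- "normal"
    have h : pvRInf xs = 4 := by
      rcases hmem with h4 | ⟨u, hu, hpu⟩
      · omega
      · have hu0 : pvPriority u ≠ 0 := fun he =>
          (List.any_eq_true.not.mp h0) ⟨u, hu, pvP0' u he⟩
        have hu1 : pvPriority u ≠ 1 := fun he =>
          (List.any_eq_true.not.mp h1) ⟨u, hu, pvP1' u he⟩
        have hu2 : pvPriority u ≠ 2 := fun he =>
          (List.any_eq_true.not.mp h2) ⟨u, hu, pvP2' u he⟩
        have hu3 : pvPriority u ≠ 3 := fun he =>
          (List.any_eq_true.not.mp h3) ⟨u, hu, pvP3' u he⟩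
        have := pvPriority_le u
        omega
    rw [h]; rfl
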